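-- pv_equiv track=rewrite | github.com/AntonioIDeTIC/MS8607-python-library | code/libSPX.py | psensorCRC_check
-- ===== SOURCE A (Python) =====
-- def psensorCRC_check(n_prom):
--     n_rem = 0x00
--     crc_read = n_prom[0]
--     n_prom[6] = 0
--     n_prom[0] = 0x0FFF & (n_prom[0])  # Clear the CRC byte
--
--     for cnt in range(0, 13):
--         # Get next byte
--         if cnt % 2 == 1:
--             n_rem ^= n_prom[cnt >> 1] & 0x00FF
--         else:
--             n_rem ^= n_prom[cnt >> 1] >> 8
--
--         for _ in range(8, -1, -1):
--             if n_rem & 0x8000: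
--                 n_rem = (n_rem << 1) ^ 0x3000
--             else:
--                 n_rem <<= 1
--
--     n_rem = ((n_rem >> 12) & 0x000F) ^ 0x00
--     if n_rem == crc_read >> 12:
--         status = True
--     else:
--         status = False
--
--     return status
-- ===== SOURCE B (Python) =====
-- # Table-driven CRC-4: precomputed 256-entry lookup tables replace the per-byte bit loop.
-- # Performs the same in-place mutations of n_prom as the original (n_prom[6]=0, n_prom[0]&=0x0FFF).
--
-- def _spin(r):
--     # nine shift steps of the generator polynomial, state kept in 16 bits
--     for _ in range(9):
--         r = (((r << 1) ^ 0x3000) if r & 0x8000 else (r << 1)) & 0xFFFF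
--     return r
--
-- _HI = [_spin(b << 8) for b in range(256)]
-- _LO = [_spin(b) for b in range(256)]
--
-- def psensorCRC_check(n_prom):
--     crc_read = n_prom[0]
--     n_prom[6] = 0
--     n_prom[0] = n_prom[0] & 0x0FFF
--     rem = 0
--     for cnt in range(13):
--         w = n_prom[cnt >> 1]
--         v = (w >> 8) if cnt % 2 == 0 else (w & 0x00FF)
--         x = rem ^ (v & 0xFFFF)
--         rem = _HI[x >> 8] ^ _LO[x & 0xFF]
--     return (rem >> 12) == crc_read >> 12
-- ===== Notes on version B (the rewrite author's own statement) =====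
-- stated objective: alternative
-- what changed: Replaces the per-byte inner nine-shift conditional loop with two precomputed 256-entry CRC lookup tables over a 16-bit-masked remainder, so each of the 13 bytes is processed by two table lookups and one XOR instead of nine shift/XOR steps.
import Mathlib
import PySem

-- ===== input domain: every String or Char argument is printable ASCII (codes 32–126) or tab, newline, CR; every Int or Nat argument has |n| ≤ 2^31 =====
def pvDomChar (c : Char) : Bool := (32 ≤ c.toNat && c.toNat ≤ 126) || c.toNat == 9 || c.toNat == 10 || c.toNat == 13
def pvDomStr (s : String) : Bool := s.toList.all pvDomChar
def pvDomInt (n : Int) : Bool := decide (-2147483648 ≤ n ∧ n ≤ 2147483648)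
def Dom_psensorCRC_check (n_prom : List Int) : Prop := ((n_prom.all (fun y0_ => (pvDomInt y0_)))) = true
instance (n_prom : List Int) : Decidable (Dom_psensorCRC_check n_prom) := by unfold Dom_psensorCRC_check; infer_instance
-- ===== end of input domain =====

-- B replaces the per-byte nine-shift bit loop by two precomputed 256-entry lookup tables
-- over a 16-bit-masked remainder (objective: alternative).
-- Both programs mutate n_prom in place the same way (n_prom[6] = 0, n_prom[0] &= 0x0FFF);
-- the equivalence proved here is about the return value.

-- ===== PORT A =====
def psensorCRC_check (n_prom : List Int) : Bool :=
  let crc_read : Int := PySem.List.pyGetD n_prom 0 0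
  let np := PySem.List.pySetD n_prom 6 0
  let np := PySem.List.pySetD np 0 (PySem.Int.band 0x0FFF (PySem.List.pyGetD np 0 0))
  let n_rem : Int :=
    (PySem.List.pyRange 0 13 1).foldl (fun (n_rem : Int) (cnt : Int) =>
      let n_rem :=
        if PySem.Int.mod cnt 2 = 1 then
          PySem.Int.bxor n_rem (PySem.Int.band (PySem.List.pyGetD np (cnt >>> (1:Nat)) 0) 0x00FF)
        else
          PySem.Int.bxor n_rem ((PySem.List.pyGetD np (cnt >>> (1:Nat)) 0) >>> (8:Nat))
      (PySem.List.pyRange 8 (-1) (-1)).foldl (fun (n_rem : Int) (_ : Int) =>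
        if PySem.Int.band n_rem 0x8000 ≠ 0 then
          PySem.Int.bxor (n_rem <<< (1:Nat)) 0x3000
        else
          n_rem <<< (1:Nat)) n_rem) 0x00
  let n_rem := PySem.Int.bxor (PySem.Int.band (n_rem >>> (12:Nat)) 0x000F) 0x00
  if n_rem = crc_read >>> (12:Nat) then true else false

-- ===== PORT B =====
-- port of Source B's _spin: nine shift steps with the state kept in 16 bits
def pvSpin (r0 : Int) : Int :=
  (PySem.List.pyRange 0 9 1).foldl (fun (r : Int) (_ : Int) =>
    PySem.Int.band
      (if PySem.Int.band r 0x8000 ≠ 0 then PySem.Int.bxor (r <<< (1:Nat)) 0x3000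
       else r <<< (1:Nat)) 0xFFFF) r0

-- port of Source B's _HI / _LO tables
def pvHI : List Int := (PySem.List.pyRange 0 256 1).map (fun (b : Int) => pvSpin (b <<< (8:Nat)))
def pvLO : List Int := (PySem.List.pyRange 0 256 1).map (fun (b : Int) => pvSpin b)

def psensorCRC_check_alt (n_prom : List Int) : Bool :=
  let crc_read : Int := PySem.List.pyGetD n_prom 0 0
  let np := PySem.List.pySetD n_prom 6 0
  let np := PySem.List.pySetD np 0 (PySem.Int.band (PySem.List.pyGetD np 0 0) 0x0FFF)
  let rem : Int :=
    (PySem.List.pyRange 0 13 1).foldl (fun (rem : Int) (cnt : Int) =>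
      let w := PySem.List.pyGetD np (cnt >>> (1:Nat)) 0
      let v := if PySem.Int.mod cnt 2 = 0 then w >>> (8:Nat) else PySem.Int.band w 0x00FF
      let x := PySem.Int.bxor rem (PySem.Int.band v 0xFFFF)
      PySem.Int.bxor (PySem.List.pyGetD pvHI (x >>> (8:Nat)) 0)
        (PySem.List.pyGetD pvLO (PySem.Int.band x 0xFF) 0)) 0
  decide (rem >>> (12:Nat) = crc_read >>> (12:Nat))

-- ===== PRECONDITION & SPEC =====
-- Pre_: the Python raises IndexError on lists shorter than 7 (it writes n_prom[6] and reads n_prom[0..6]).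
def Pre_psensorCRC_check (n_prom : List Int) : Prop := 7 ≤ n_prom.length
instance (n_prom : List Int) : Decidable (Pre_psensorCRC_check n_prom) := by unfold Pre_psensorCRC_check; infer_instance
def pvWitness_psensorCRC_check : List Int := [0, 0, 0, 0, 0, 0, 0]

def Spec_psensorCRC_check (n_prom : List Int) (out : Bool) : Prop := out = psensorCRC_check_alt n_prom
instance (n_prom : List Int) (out : Bool) : Decidable (Spec_psensorCRC_check n_prom out) := by unfold Spec_psensorCRC_check; infer_instance

-- ===== CLAIM (what is proved, stated in full; the proofs are below) =====
def Claim_equal_psensorCRC_check : Prop := ∀ (n_prom : List Int), Dom_psensorCRC_check n_prom → Pre_psensorCRC_check n_prom → Spec_psensorCRC_check n_prom (psensorCRC_check n_prom)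

-- ===== LEMMAS AND PROOFS =====

-- low 16 bits of an Int, the quantity both CRC loops actually carry
def pvM (n : Int) : Nat := (n % 65536).toNat

-- A's single shift step (unmasked, as in the Python inner loop)
def pvStepA : Int → Int := fun n_rem =>
  if PySem.Int.band n_rem 0x8000 ≠ 0 then PySem.Int.bxor (n_rem <<< (1:Nat)) 0x3000
  else n_rem <<< (1:Nat)

-- B's single shift step on the Nat side
def pvStepN : Nat → Nat := fun r =>
  (if r &&& 32768 ≠ 0 then (r <<< 1) ^^^ 12288 else r <<< 1) &&& 65535

theorem pvComplXor : ∀ (k : Nat), ∀ x < 2^k, x ^^^ (2^k - 1) = 2^k - 1 - x := by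
  intro k
  induction k with
  | zero => intro x hx; interval_cases x; decide
  | succ k ih =>
    intro x hx
    have hpos : 0 < 2^k := Nat.two_pow_pos k
    have hp : 2^(k+1) = 2*2^k := by ring
    have hb := Nat.bit_testBit_zero_shiftRight_one x
    set b := x.testBit 0 with hbdef
    set m := x >>> 1 with hmdef
    have hval : ∀ (c : Bool) (y : Nat), Nat.bit c y = 2*y + c.toNat := by
      intro c y; cases c <;> simp [Nat.bit]
    have hbt : b.toNat ≤ 1 := Bool.toNat_le b
    have hnbt : (!b).toNat = 1 - b.toNat := by cases b <;> rfl
    rw [hval] at hb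
    have hm : m < 2^k := by omega
    have hmask : (2^(k+1) - 1) = Nat.bit true (2^k - 1) := by rw [hval]; simp; omega
    calc x ^^^ (2^(k+1) - 1) = Nat.bit b m ^^^ Nat.bit true (2^k - 1) := by
          conv_lhs => rw [← Nat.bit_testBit_zero_shiftRight_one x, hmask]
    _ = Nat.bit (b != true) (m ^^^ (2^k - 1)) := by rw [Nat.xor_bit]
    _ = Nat.bit (!b) (2^k - 1 - m) := by rw [ih _ hm]; cases b <;> rfl
    _ = 2^(k+1) - 1 - x := by rw [hval, hnbt]; omega

theorem pvCompl16 (x : Nat) (h : x < 65536) : x ^^^ 65535 = 65535 - x := by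
  have := pvComplXor 16 x (by norm_num; omega)
  norm_num at this; exact this

theorem pvXorMod (m n : Nat) : (m ^^^ n) % 65536 = (m % 65536) ^^^ (n % 65536) := by
  have h : (65536:Nat) = 2^16 := by norm_num
  rw [h]
  apply Nat.eq_of_testBit_eq; intro i
  simp only [Nat.testBit_mod_two_pow, Nat.testBit_xor]
  by_cases hi : i < 16 <;> simp [hi]

theorem pvXorLt (m n : Nat) (hm : m < 65536) (hn : n < 65536) : m ^^^ n < 65536 := by
  have h : (65536:Nat) = 2^16 := by norm_num
  rw [h] at hm hn ⊢; exact Nat.xor_lt_two_pow hm hn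

theorem pvAndMod16 (m : Nat) : m &&& 65535 = m % 65536 := by
  have := Nat.and_two_pow_sub_one_eq_mod m 16; norm_num at this; exact this

theorem pvAndMod8 (m : Nat) : m &&& 255 = m % 256 := by
  have := Nat.and_two_pow_sub_one_eq_mod m 8; norm_num at this; exact this

theorem pvAndMod4 (m : Nat) : m &&& 15 = m % 16 := by
  have := Nat.and_two_pow_sub_one_eq_mod m 4; norm_num at this; exact this

theorem pvAndBit (m : Nat) : m &&& 32768 = (m % 65536) &&& 32768 := by
  have h15 : (32768:Nat) = 2^15 := by norm_num
  have h16 : (65536:Nat) = 2^16 := by norm_num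
  rw [h15, h16, Nat.and_two_pow, Nat.and_two_pow]
  have := Nat.testBit_mod_two_pow m 16 15
  rw [this]; norm_num

theorem pvAndBitVals (m : Nat) : m &&& 32768 = 0 ∨ m &&& 32768 = 32768 := by
  have h15 : (32768:Nat) = 2^15 := by norm_num
  rw [h15, Nat.and_two_pow]
  cases m.testBit 15 <;> simp

-- pvM on nonnegative / negative inputs
theorem pvM_nonneg (a : Int) (h : 0 ≤ a) : pvM a = a.toNat % 65536 := by unfold pvM; omega

theorem pvM_neg (a : Int) (h : a < 0) : pvM a = 65535 - ((-a - 1).toNat % 65536) := by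
  unfold pvM; omega

theorem pvM_natCast (m : Nat) : pvM (↑m) = m % 65536 := by unfold pvM; omega

theorem pvM_lt (a : Int) : pvM a < 65536 := by unfold pvM; omega

-- band with the three masks
theorem pvBand65535 (a : Int) : PySem.Int.band a 65535 = ↑(pvM a) := by
  rcases le_or_gt 0 a with h | h
  · rw [PySem.Int.band_of_nonneg h (by norm_num), pvM_nonneg a h]
    have ht : (65535:Int).toNat = 65535 := rfl
    rw [ht, pvAndMod16]
  · have h' : ¬ (0 ≤ a) := by omega
    simp only [PySem.Int.band, h', if_false, if_pos (show (0:Int) ≤ 65535 by norm_num)]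
    rw [pvM_neg a h]
    have ht : (65535:Int).toNat = 65535 := rfl
    rw [ht, Nat.land_comm, pvAndMod16]

theorem pvBandBit (a : Int) : PySem.Int.band a 32768 = ↑(pvM a &&& 32768) := by
  rcases le_or_gt 0 a with h | h
  · rw [PySem.Int.band_of_nonneg h (by norm_num), pvM_nonneg a h]
    have ht : (32768:Int).toNat = 32768 := rfl
    rw [ht, pvAndBit a.toNat]
  · have h' : ¬ (0 ≤ a) := by omega
    simp only [PySem.Int.band, h', if_false, if_pos (show (0:Int) ≤ 32768 by norm_num)]
    rw [pvM_neg a h]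
    set m := (-a - 1).toNat % 65536 with hm
    have hmlt : m < 65536 := by omega
    have hcompl : 65535 - m = m ^^^ 65535 := (pvCompl16 m hmlt).symm
    have h1 : (32768:Int).toNat &&& (-a-1).toNat = m &&& 32768 := by
      have ht : (32768:Int).toNat = 32768 := rfl
      rw [ht, Nat.land_comm, pvAndBit]
    rw [h1, hcompl, Nat.and_xor_distrib_right]
    have h65 : (65535 &&& 32768 : Nat) = 32768 := by decide
    rw [h65]
    rcases pvAndBitVals m with h2 | h2 <;> rw [h2] <;> decide

theorem pvXorCancel (x y c : Nat) : (x ^^^ c) ^^^ (y ^^^ c) = x ^^^ y := by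
  apply Nat.eq_of_testBit_eq; intro i
  simp only [Nat.testBit_xor]
  generalize x.testBit i = p
  generalize y.testBit i = q
  generalize Nat.testBit c i = r
  cases p <;> cases q <;> cases r <;> rfl

theorem pvBxorM (a b : Int) : pvM (PySem.Int.bxor a b) = pvM a ^^^ pvM b := by
  have key : ∀ (x y : Int), 0 ≤ x → y < 0 →
      pvM (PySem.Int.bxor x y) = pvM x ^^^ pvM y := by
    intro x y hx hy
    have hy' : ¬ (0 ≤ y) := by omega
    simp only [PySem.Int.bxor, hx, if_true, hy', if_false]
    set m := x.toNat with hmdef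
    set n := (-y - 1).toNat with hndef
    have hneg : (-(↑(m ^^^ n) : Int) - 1) < 0 := by omega
    rw [pvM_neg _ (by omega)]
    have hsimp : (-(-(↑(m ^^^ n) : Int) - 1) - 1).toNat = m ^^^ n := by omega
    rw [hsimp, pvXorMod, pvM_nonneg x hx, pvM_neg y hy, ← hmdef, ← hndef]
    set M := m % 65536 with hM
    set N := n % 65536 with hN
    have hMlt : M < 65536 := by omega
    have hNlt : N < 65536 := by omega
    rw [← pvCompl16 _ (pvXorLt M N hMlt hNlt), ← pvCompl16 N hNlt, Nat.xor_assoc]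
  rcases le_or_gt 0 a with ha | ha <;> rcases le_or_gt 0 b with hb | hb
  · rw [PySem.Int.bxor_of_nonneg ha hb, pvM_natCast, pvXorMod, pvM_nonneg a ha, pvM_nonneg b hb]
  · exact key a b ha hb
  · rw [PySem.Int.bxor_comm, key b a hb ha, Nat.xor_comm]
  · have ha' : ¬ (0 ≤ a) := by omega
    have hb' : ¬ (0 ≤ b) := by omega
    simp only [PySem.Int.bxor, ha', hb', if_false]
    rw [pvM_natCast, pvXorMod, pvM_neg a ha, pvM_neg b hb]
    set M := (-a - 1).toNat % 65536 with hM
    set N := (-b - 1).toNat % 65536 with hN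
    have hMlt : M < 65536 := by omega
    have hNlt : N < 65536 := by omega
    rw [← pvCompl16 M hMlt, ← pvCompl16 N hNlt, pvXorCancel]

theorem pvShiftM (a : Int) : pvM (a <<< (1:Nat)) = (pvM a <<< 1) % 65536 := by
  rw [Int.shiftLeft_eq]
  have h1 : pvM a <<< 1 = pvM a * 2 := by simp [Nat.shiftLeft_eq]
  unfold pvM at *
  omega

-- A's step tracks B's Nat step on the low 16 bits
theorem pvStepAM (n : Int) : pvM (pvStepA n) = pvStepN (pvM n) := by
  unfold pvStepA pvStepN
  have hcond : (PySem.Int.band n 0x8000 ≠ 0) ↔ (pvM n &&& 32768 ≠ 0) := by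
    rw [pvBandBit]
    exact ⟨fun h h2 => h (by rw [h2]; rfl), fun h h2 => h (by exact_mod_cast h2)⟩
  have h12 : pvM 0x3000 = 12288 := by decide
  by_cases h : pvM n &&& 32768 ≠ 0
  · rw [if_pos (hcond.mpr h), if_pos h, pvAndMod16, pvBxorM, pvShiftM, h12, pvXorMod]
  · rw [if_neg (fun hc => h (hcond.mp hc)), if_neg h, pvAndMod16, pvShiftM]

theorem pvIterM (k : Nat) (n : Int) : pvM (pvStepA^[k] n) = pvStepN^[k] (pvM n) := by
  induction k with
  | zero => simp
  | succ k ih => rw [Function.iterate_succ_apply', Function.iterate_succ_apply', pvStepAM, ih]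

-- B's single shift step on the Int side (the lambda inside pvSpin)
def pvStepB : Int → Int := fun r =>
  PySem.Int.band
    (if PySem.Int.band r 0x8000 ≠ 0 then PySem.Int.bxor (r <<< (1:Nat)) 0x3000
     else r <<< (1:Nat)) 0xFFFF

theorem pvStepCast (m : Nat) : pvStepB ↑m = ↑(pvStepN m) := by
  unfold pvStepB pvStepN
  have hsh : ((↑m:Int) <<< (1:Nat)) = ↑(m <<< 1) := by
    simp [Int.shiftLeft_eq, Nat.shiftLeft_eq]
  have hband : PySem.Int.band (↑m) 0x8000 = ↑(m &&& 32768) := by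
    rw [PySem.Int.band_of_nonneg (by positivity) (by norm_num)]
    simp
  have h65 : (0xFFFF:Int).toNat = 65535 := rfl
  have h12 : (0x3000:Int).toNat = 12288 := rfl
  have hbd : ∀ (k : Nat), PySem.Int.band (↑k:Int) 0xFFFF = ↑(k &&& 65535) := by
    intro k
    rw [PySem.Int.band_of_nonneg (by positivity) (by norm_num), Int.toNat_natCast, h65]
  have hbx : PySem.Int.bxor (↑(m <<< 1):Int) 0x3000 = ↑((m <<< 1) ^^^ 12288) := by
    rw [PySem.Int.bxor_of_nonneg (by positivity) (by norm_num), Int.toNat_natCast, h12]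
  by_cases h : m &&& 32768 ≠ 0
  · rw [hband, if_pos (by exact_mod_cast h), hsh, hbx, hbd, if_pos h]
  · have h' : ¬ ((↑(m &&& 32768) : Int) ≠ 0) := by
      simp only [ne_eq, not_not] at h ⊢; exact_mod_cast h
    rw [hband, if_neg h', hsh, hbd, if_neg h]

-- a fold that ignores the list elements is an iterate
theorem pvFoldConst (g : Int → Int) : ∀ (l : List Int) (s : Int),
    l.foldl (fun a (_ : Int) => g a) s = g^[l.length] s := by
  intro l
  induction l with
  | nil => intro s; rfl
  | cons x xs ih => intro s; simp [List.foldl_cons, ih, Function.iterate_succ_apply]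

theorem pvIterCast (k : Nat) (m : Nat) : pvStepB^[k] ↑m = ↑(pvStepN^[k] m) := by
  induction k with
  | zero => rfl
  | succ k ih => rw [Function.iterate_succ_apply', Function.iterate_succ_apply', ih, pvStepCast]

theorem pvSpinCast (m : Nat) : pvSpin ↑m = ↑(pvStepN^[9] m) := by
  unfold pvSpin
  rw [show (fun (r : Int) (_ : Int) =>
      PySem.Int.band
        (if PySem.Int.band r 0x8000 ≠ 0 then PySem.Int.bxor (r <<< (1:Nat)) 0x3000
         else r <<< (1:Nat)) 0xFFFF) = (fun (a : Int) (_ : Int) => pvStepB a) from rfl,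
    pvFoldConst pvStepB, show (PySem.List.pyRange 0 9 1).length = 9 from by decide,
    pvIterCast]

-- linearity of the masked step over XOR
theorem pvStepNLin (a b : Nat) : pvStepN (a ^^^ b) = pvStepN a ^^^ pvStepN b := by
  unfold pvStepN
  have hand : (a ^^^ b) &&& 32768 = (a &&& 32768) ^^^ (b &&& 32768) := Nat.and_xor_distrib_right
  have hsh : (a ^^^ b) <<< 1 = (a <<< 1) ^^^ (b <<< 1) := Nat.shiftLeft_xor_distrib
  have hdist : ∀ (x y : Nat), (x &&& 65535) ^^^ (y &&& 65535) = (x ^^^ y) &&& 65535 :=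
    fun x y => (Nat.and_xor_distrib_right).symm
  rcases pvAndBitVals a with h1 | h1 <;> rcases pvAndBitVals b with h2 | h2
  · rw [if_neg (by rw [hand, h1, h2]; decide), if_neg (by rw [h1]; decide),
      if_neg (by rw [h2]; decide), hdist, hsh]
  · rw [if_pos (by rw [hand, h1, h2]; decide), if_neg (by rw [h1]; decide),
      if_pos (by rw [h2]; decide), hdist, hsh, Nat.xor_assoc]
  · rw [if_pos (by rw [hand, h1, h2]; decide), if_pos (by rw [h1]; decide),
      if_neg (by rw [h2]; decide), hdist, hsh]
    congr 1
    rw [Nat.xor_assoc (a <<< 1) 12288 (b <<< 1), Nat.xor_comm 12288 (b <<< 1),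
      ← Nat.xor_assoc]
  · rw [if_neg (by rw [hand, h1, h2]; decide), if_pos (by rw [h1]; decide),
      if_pos (by rw [h2]; decide), hdist, hsh, pvXorCancel]

theorem pvIterLin (k : Nat) (a b : Nat) :
    pvStepN^[k] (a ^^^ b) = pvStepN^[k] a ^^^ pvStepN^[k] b := by
  induction k with
  | zero => simp
  | succ k ih => rw [Function.iterate_succ_apply', Function.iterate_succ_apply',
      Function.iterate_succ_apply', ih, pvStepNLin]

theorem pvHiLo (r : Nat) : (r >>> 8 <<< 8) ^^^ (r &&& 255) = r := by
  have h255 : ∀ j, Nat.testBit 255 j = decide (j < 8) := by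
    intro j; have := Nat.testBit_two_pow_sub_one 8 j; norm_num at this; exact this
  apply Nat.eq_of_testBit_eq; intro i
  simp only [Nat.testBit_xor, Nat.testBit_shiftLeft, ge_iff_le, Nat.testBit_shiftRight,
    Nat.testBit_and, h255]
  rcases lt_or_ge i 8 with h | h
  · have h8 : ¬ (8 ≤ i) := by omega
    simp [h8, h]
  · have h8 : ¬ (i < 8) := by omega
    simp [h, h8]

theorem pvCastShiftR (m : Nat) (k : Nat) : (↑m : Int) >>> k = ↑(m >>> k) := by
  rw [Int.shiftRight_eq_div_pow, Nat.shiftRight_eq_div_pow]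
  omega

-- A's inner nine-step loop as an iterate
theorem pvInner9 (n0 : Int) :
    (PySem.List.pyRange 8 (-1) (-1)).foldl (fun (n_rem : Int) (_ : Int) =>
      if PySem.Int.band n_rem 0x8000 ≠ 0 then
        PySem.Int.bxor (n_rem <<< (1:Nat)) 0x3000
      else
        n_rem <<< (1:Nat)) n0 = pvStepA^[9] n0 := by
  rw [show (fun (n_rem : Int) (_ : Int) =>
      if PySem.Int.band n_rem 0x8000 ≠ 0 then
        PySem.Int.bxor (n_rem <<< (1:Nat)) 0x3000
      else
        n_rem <<< (1:Nat)) = (fun (a : Int) (_ : Int) => pvStepA a) from rfl,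
    pvFoldConst pvStepA, show (PySem.List.pyRange 8 (-1) (-1)).length = 9 from by decide]

-- the table-step of B computes the masked value of A's per-byte group
theorem pvGroup (n r v : Int) (h : r = ↑(pvM n)) :
    PySem.Int.bxor
      (PySem.List.pyGetD pvHI ((PySem.Int.bxor r (PySem.Int.band v 0xFFFF)) >>> (8:Nat)) 0)
      (PySem.List.pyGetD pvLO (PySem.Int.band (PySem.Int.bxor r (PySem.Int.band v 0xFFFF)) 0xFF) 0)
    = ↑(pvM (pvStepA^[9] (PySem.Int.bxor n v))) := by
  have hx : PySem.Int.bxor r (PySem.Int.band v 0xFFFF) = ↑(pvM n ^^^ pvM v) := by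
    rw [h, pvBand65535, PySem.Int.bxor_of_nonneg (by positivity) (by positivity)]
    norm_num
  set X := pvM n ^^^ pvM v with hX
  have hXlt : X < 65536 := pvXorLt _ _ (pvM_lt n) (pvM_lt v)
  have hhi : X >>> 8 < 256 := by
    rw [Nat.shiftRight_eq_div_pow]; omega
  have hlo : X &&& 255 < 256 := by rw [pvAndMod8]; omega
  rw [hx, pvCastShiftR]
  have hband : PySem.Int.band (↑X) 0xFF = ↑(X &&& 255) := by
    rw [PySem.Int.band_of_nonneg (by positivity) (by norm_num), Int.toNat_natCast,
      show (0xFF:Int).toNat = 255 from rfl]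
  rw [hband]
  unfold pvHI pvLO
  rw [PySem.List.pyGetD_map_pyRange_of_nonneg _ 256 _ 0 (by positivity) (by exact_mod_cast hhi)]
  rw [PySem.List.pyGetD_map_pyRange_of_nonneg _ 256 _ 0 (by positivity) (by exact_mod_cast hlo)]
  have hshl : ((↑(X >>> 8) : Int) <<< (8:Nat)) = ↑(X >>> 8 <<< 8) := by
    rw [Int.shiftLeft_eq, Nat.shiftLeft_eq]; push_cast; ring
  rw [hshl, pvSpinCast, pvSpinCast,
    PySem.Int.bxor_of_nonneg (by positivity) (by positivity)]
  have : (↑(pvStepN^[9] (X >>> 8 <<< 8)):Int).toNat ^^^ (↑(pvStepN^[9] (X &&& 255)):Int).toNat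
      = pvStepN^[9] X := by
    simp only [Int.toNat_natCast]
    rw [← pvIterLin, pvHiLo]
  rw [this, pvIterM, pvBxorM]

-- the two 13-step loops agree
theorem pvFoldRel (np : List Int) : ∀ (l : List Int) (n r : Int), r = ↑(pvM n) →
    l.foldl (fun (rem : Int) (cnt : Int) =>
      let w := PySem.List.pyGetD np (cnt >>> (1:Nat)) 0
      let v := if PySem.Int.mod cnt 2 = 0 then w >>> (8:Nat) else PySem.Int.band w 0x00FF
      let x := PySem.Int.bxor rem (PySem.Int.band v 0xFFFF)
      PySem.Int.bxor (PySem.List.pyGetD pvHI (x >>> (8:Nat)) 0)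
        (PySem.List.pyGetD pvLO (PySem.Int.band x 0xFF) 0)) r
    = ↑(pvM (l.foldl (fun (n_rem : Int) (cnt : Int) =>
      let n_rem :=
        if PySem.Int.mod cnt 2 = 1 then
          PySem.Int.bxor n_rem (PySem.Int.band (PySem.List.pyGetD np (cnt >>> (1:Nat)) 0) 0x00FF)
        else
          PySem.Int.bxor n_rem ((PySem.List.pyGetD np (cnt >>> (1:Nat)) 0) >>> (8:Nat))
      (PySem.List.pyRange 8 (-1) (-1)).foldl (fun (n_rem : Int) (_ : Int) =>
        if PySem.Int.band n_rem 0x8000 ≠ 0 then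
          PySem.Int.bxor (n_rem <<< (1:Nat)) 0x3000
        else
          n_rem <<< (1:Nat)) n_rem) n)) := by
  intro l
  induction l with
  | nil => intro n r h; exact h
  | cons cnt rest ih =>
    intro n r h
    simp only [List.foldl_cons]
    apply ih
    rw [pvInner9]
    rcases PySem.Int.mod_two_eq cnt with hm | hm
    · simp only [hm]
      exact pvGroup n r _ h
    · simp only [hm]
      exact pvGroup n r _ h

-- A's final masked nibble is B's top nibble
theorem pvFinal (a : Int) :
    PySem.Int.bxor (PySem.Int.band (a >>> (12:Nat)) 0x000F) 0x00 = (↑(pvM a) : Int) >>> (12:Nat) := by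
  rw [PySem.Int.bxor_zero]
  have hb : PySem.Int.band (a >>> (12:Nat)) 0x000F = ((a >>> (12:Nat)) % 16 : Int) := by
    set q := a >>> (12:Nat) with hq
    rcases le_or_gt 0 q with h | h
    · rw [PySem.Int.band_of_nonneg h (by norm_num)]
      have ht : (0x000F:Int).toNat = 15 := rfl
      rw [ht, pvAndMod4]
      omega
    · have h' : ¬ (0 ≤ q) := by omega
      simp only [PySem.Int.band, h', if_false, if_pos (show (0:Int) ≤ 0x000F by norm_num)]
      have ht : (0x000F:Int).toNat = 15 := rfl
      rw [ht, Nat.land_comm, pvAndMod4]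
      omega
  rw [hb, Int.shiftRight_eq_div_pow, Int.shiftRight_eq_div_pow]
  unfold pvM
  norm_num
  omega

-- the mutated PROM list, in B's orientation (n_prom[0] & 0x0FFF) and A's (0x0FFF & n_prom[0])
def pvNp (n_prom : List Int) : List Int :=
  PySem.List.pySetD (PySem.List.pySetD n_prom 6 0) 0
    (PySem.Int.band (PySem.List.pyGetD (PySem.List.pySetD n_prom 6 0) 0 0) 0x0FFF)

def pvNpA (n_prom : List Int) : List Int :=
  PySem.List.pySetD (PySem.List.pySetD n_prom 6 0) 0
    (PySem.Int.band 0x0FFF (PySem.List.pyGetD (PySem.List.pySetD n_prom 6 0) 0 0))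

theorem pvNpEq (n_prom : List Int) : pvNpA n_prom = pvNp n_prom := by
  unfold pvNp pvNpA
  rw [PySem.Int.band_comm]

def pvLoopA (np : List Int) : Int :=
  (PySem.List.pyRange 0 13 1).foldl (fun (n_rem : Int) (cnt : Int) =>
    let n_rem :=
      if PySem.Int.mod cnt 2 = 1 then
        PySem.Int.bxor n_rem (PySem.Int.band (PySem.List.pyGetD np (cnt >>> (1:Nat)) 0) 0x00FF)
      else
        PySem.Int.bxor n_rem ((PySem.List.pyGetD np (cnt >>> (1:Nat)) 0) >>> (8:Nat))
    (PySem.List.pyRange 8 (-1) (-1)).foldl (fun (n_rem : Int) (_ : Int) =>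
      if PySem.Int.band n_rem 0x8000 ≠ 0 then
        PySem.Int.bxor (n_rem <<< (1:Nat)) 0x3000
      else
        n_rem <<< (1:Nat)) n_rem) 0x00

def pvLoopB (np : List Int) : Int :=
  (PySem.List.pyRange 0 13 1).foldl (fun (rem : Int) (cnt : Int) =>
    let w := PySem.List.pyGetD np (cnt >>> (1:Nat)) 0
    let v := if PySem.Int.mod cnt 2 = 0 then w >>> (8:Nat) else PySem.Int.band w 0x00FF
    let x := PySem.Int.bxor rem (PySem.Int.band v 0xFFFF)
    PySem.Int.bxor (PySem.List.pyGetD pvHI (x >>> (8:Nat)) 0)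
      (PySem.List.pyGetD pvLO (PySem.Int.band x 0xFF) 0)) 0

theorem pvLoopRel (np : List Int) : pvLoopB np = ↑(pvM (pvLoopA np)) := by
  unfold pvLoopA pvLoopB
  exact pvFoldRel np (PySem.List.pyRange 0 13 1) 0x00 0 (by decide)

-- ===== VERDICT (by name: the statement is the Claim_ definition above) =====
theorem psensorCRC_check_spec : Claim_equal_psensorCRC_check := by
  intro n_prom _hd _hp
  show (if PySem.Int.bxor (PySem.Int.band ((pvLoopA (pvNpA n_prom)) >>> (12:Nat)) 0x000F) 0x00
          = (PySem.List.pyGetD n_prom 0 0) >>> (12:Nat) then true else false)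
    = decide ((pvLoopB (pvNp n_prom)) >>> (12:Nat) = (PySem.List.pyGetD n_prom 0 0) >>> (12:Nat))
  rw [pvNpEq, pvLoopRel, pvFinal]
  by_cases h : ((↑(pvM (pvLoopA (pvNp n_prom))) : Int) >>> (12:Nat))
      = (PySem.List.pyGetD n_prom 0 0) >>> (12:Nat)
  · rw [if_pos h]; exact (decide_eq_true h).symm
  · rw [if_neg h]; exact (decide_eq_false h).symm
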